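-- pv_equiv track=rewrite | github.com/YemotaY/python_excercises | Basic Exercise for Beginners/Exercise 10.py | calculate
-- ===== SOURCE A (Python) =====
-- def calculate(a,b):
--     res = []
--     for i in range(len(a)):
--         if(i%2!=0):
--             res.append(a[i])
--     for i in range(len(b)):
--         if(i%2!=0):
--             res.append(b[i])
--     return res
-- ===== SOURCE B (Python) =====
-- def calculate(a, b):
--     return a[1::2] + b[1::2]
-- ===== Notes on version B (the rewrite author's own statement) =====
-- stated objective: idiomatic
-- what changed: Replaced the two explicit index loops with modulo tests by stride slicing (a[1::2] + b[1::2]), selecting the odd-indexed elements directly with no loop or branch.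
import Mathlib
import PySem

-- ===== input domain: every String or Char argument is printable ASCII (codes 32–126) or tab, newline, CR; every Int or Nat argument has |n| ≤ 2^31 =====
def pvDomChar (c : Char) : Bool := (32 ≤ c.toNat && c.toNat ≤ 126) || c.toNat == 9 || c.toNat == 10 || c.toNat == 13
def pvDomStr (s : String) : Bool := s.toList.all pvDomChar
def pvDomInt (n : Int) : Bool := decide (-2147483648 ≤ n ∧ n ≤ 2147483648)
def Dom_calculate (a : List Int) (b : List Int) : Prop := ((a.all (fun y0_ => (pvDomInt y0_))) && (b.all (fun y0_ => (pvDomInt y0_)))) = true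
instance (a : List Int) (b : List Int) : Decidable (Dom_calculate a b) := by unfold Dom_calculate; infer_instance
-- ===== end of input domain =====

-- B replaces the two index loops with modulo tests by stride slicing (a[1::2] + b[1::2]); objective: idiomatic.


-- ===== PORT A =====
-- 'for i in range(len(xs)): if i%2!=0: res.append(xs[i])' (xs[i] is always in range, so pyGetD is exact here)
def calcLoop (xs : List Int) (res : List Int) : List Int :=
  (PySem.List.pyRange 0 (PySem.List.len xs) 1).foldl
    (fun r i => if PySem.Int.mod i 2 ≠ 0 then r ++ [PySem.List.pyGetD xs i 0] else r) res

def calculate (a : List Int) (b : List Int) : List Int :=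
  calcLoop b (calcLoop a [])

-- ===== PORT B =====
-- xs[1::2] = every second element of xs starting at index 1 (stride-2 slice, ported structurally)
def slice12 : List Int → List Int
  | [] => []
  | [_] => []
  | _ :: y :: t => y :: slice12 t

def calculate_alt (a : List Int) (b : List Int) : List Int :=
  slice12 a ++ slice12 b

-- ===== PRECONDITION & SPEC =====
def Spec_calculate (a : List Int) (b : List Int) (out : List Int) : Prop := out = calculate_alt a b
instance (a : List Int) (b : List Int) (out : List Int) : Decidable (Spec_calculate a b out) := by unfold Spec_calculate; infer_instance

-- ===== CLAIM (what is proved, stated in full; the proofs are below) =====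
def Claim_equal_calculate : Prop := ∀ (a : List Int) (b : List Int), Dom_calculate a b → Spec_calculate a b (calculate a b)

-- ===== LEMMAS AND PROOFS =====

theorem calcLoop_eq (xs : List Int) : ∀ (res : List Int), calcLoop xs res = res ++ slice12 xs := by
  induction xs using slice12.induct with
  | case1 => intro res; simp [calcLoop, slice12, PySem.List.pyRange_one_eq_nil]
  | case2 x =>
      intro res
      unfold calcLoop
      have hlen : PySem.List.len [x] = ((1 : Nat) : Int) := by simp [PySem.List.len]
      rw [hlen, PySem.List.pyRange_zero_nat]
      simp only [List.range_one, List.map_cons, List.map_nil, List.foldl_cons, List.foldl_nil,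
        Nat.cast_zero]
      rw [if_neg (by decide : ¬ (PySem.Int.mod (0 : Int) 2 ≠ 0))]
      simp [slice12]
  | case3 x y t ih =>
      intro res
      have ih' := ih (res ++ [y])
      simp only [calcLoop, PySem.List.len_eq] at ih'
      rw [PySem.List.pyRange_zero_nat, List.foldl_map] at ih'
      have hlen : PySem.List.len (x :: y :: t) = ((t.length + 2 : Nat) : Int) := by
        simp [PySem.List.len]; omega
      have hr : List.range (t.length + 2) = 0 :: 1 :: (List.range t.length).map (· + 2) := by
        rw [List.range_succ_eq_map, List.range_succ_eq_map]
        simp [List.map_map, Function.comp]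
      unfold calcLoop
      rw [hlen, PySem.List.pyRange_zero_nat, hr]
      simp only [List.map_cons, List.foldl_cons, List.map_map, Nat.cast_zero, Nat.cast_one]
      rw [if_neg (by decide : ¬ (PySem.Int.mod (0 : Int) 2 ≠ 0)),
        if_pos (by decide : (PySem.Int.mod (1 : Int) 2 ≠ 0))]
      have hget1 : PySem.List.pyGetD (x :: y :: t) (1 : Int) 0 = y := by
        rw [show (1 : Int) = ((1 : Nat) : Int) by norm_num, PySem.List.pyGetD_natCast]; rfl
      rw [hget1, List.foldl_map]
      rw [PySem.List.foldl_congr_mem _ _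
        (fun (r : List Int) (k : Nat) =>
          if PySem.Int.mod ((k : Int)) 2 ≠ 0 then r ++ [PySem.List.pyGetD t ((k : Int)) 0] else r)
        _ ?_]
      · rw [ih']
        simp [slice12]
      · intro r k _
        have hm : PySem.Int.mod (((k : Int) + 2)) 2 = PySem.Int.mod ((k : Int)) 2 := by
          simp only [PySem.Int.mod]
          rw [show ((k : Int) + 2) = (k : Int) + 2 * 1 by ring, Int.add_mul_fmod_self_left]
        have hc : ((fun k => ((k : Nat) : Int)) ∘ (· + 2)) k = ((k : Int) + 2) := by
          simp [Function.comp]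
        have hg : PySem.List.pyGetD (x :: y :: t) (((k : Int) + 2)) 0
            = PySem.List.pyGetD t ((k : Int)) 0 := by
          rw [show ((k : Int) + 2) = (((k + 2 : Nat)) : Int) by push_cast; ring,
            PySem.List.pyGetD_natCast, PySem.List.pyGetD_natCast]; rfl
        simp only [hc, hm, hg]

-- ===== VERDICT (by name: the statement is the Claim_ definition above) =====
theorem calculate_spec : Claim_equal_calculate := by
  intro a b _
  unfold Spec_calculate calculate calculate_alt
  rw [calcLoop_eq, calcLoop_eq, List.nil_append]
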